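-- pv_equiv track=rewrite | github.com/ntnguyen-so/Fusion3DCNN---PFP | PFP/build_alert_code.py | build_longterm_alert_code
-- ===== SOURCE A (Python) =====
-- def get_topk_patterns(collected_patterns, k):
--   order = {k: v for k, v in sorted(collected_patterns.items(), key=lambda item: item[1], reverse=True)}
--   return list(order.keys())[:min(k, len(order))]
--
-- def build_longterm_alert_code(patterns_days, k=10):
--   collected_patterns = {}
--   steps = 6
--   for start in range(len(patterns_days)-6):
--     patterns_day0 = patterns_days[start]
--     for pattern in patterns_day0:
--       appear = True
--       for patterns_day in patterns_days[start:start+steps]: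
--         if pattern not in patterns_day:
--           appear = False
--           break
--
--       if appear == True:
--         if pattern in collected_patterns:
--           collected_patterns[pattern] += 1
--         else:
--           collected_patterns[pattern] = 1
--
--   return get_topk_patterns(collected_patterns, k)
-- ===== SOURCE B (Python) =====
-- def build_longterm_alert_code(patterns_days, k=10):
--     # Backward DP: runs[d][p] = number of consecutive days starting at d that contain p.
--     run_next = {}
--     runs = []
--     for day in reversed(patterns_days):
--         cur = {}
--         for p in set(day):
--             cur[p] = 1 + run_next.get(p, 0)
--         runs.append(cur)
--         run_next = cur
--     runs.reverse()
--     counts = {}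
--     for start in range(len(patterns_days) - 6):
--         for p in patterns_days[start]:
--             if runs[start].get(p, 0) >= 6:
--                 counts[p] = counts.get(p, 0) + 1
--     ordered = [p for p, _ in sorted(counts.items(), key=lambda it: it[1], reverse=True)]
--     return ordered[:min(k, len(ordered))]
-- ===== Notes on version B (the rewrite author's own statement) =====
-- stated objective: faster
-- what changed: Replaces the per-window 6-day membership rescans over raw lists by a backward dynamic program of per-day run-length dictionaries (runs[d][p] = consecutive days from d containing p), so each qualification test becomes one O(1) dict lookup.
import Mathlib
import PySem

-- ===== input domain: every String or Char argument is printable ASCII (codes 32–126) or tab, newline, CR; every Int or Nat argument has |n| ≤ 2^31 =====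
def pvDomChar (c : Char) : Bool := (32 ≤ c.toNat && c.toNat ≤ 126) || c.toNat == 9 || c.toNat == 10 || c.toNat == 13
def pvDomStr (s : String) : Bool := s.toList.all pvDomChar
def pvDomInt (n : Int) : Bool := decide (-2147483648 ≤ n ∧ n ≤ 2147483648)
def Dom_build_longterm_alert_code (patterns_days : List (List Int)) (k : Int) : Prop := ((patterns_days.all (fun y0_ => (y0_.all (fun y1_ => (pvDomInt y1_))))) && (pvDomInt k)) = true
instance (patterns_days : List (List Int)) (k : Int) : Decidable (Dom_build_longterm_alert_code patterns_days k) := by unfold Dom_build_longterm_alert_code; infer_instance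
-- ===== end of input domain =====

-- ===== PORT A =====
-- B is faster: it replaces A's per-window 6-day membership rescans by precomputed run-length dictionaries.
-- helper of A: the inner 'for patterns_day in patterns_days[start:start+steps]: if pattern not in patterns_day: appear=False; break' loop
def pvAppearLoop (pattern : Int) : List (List Int) → Bool
  | [] => true
  | d :: rest => if pattern ∈ d then pvAppearLoop pattern rest else false

-- helper of A: get_topk_patterns
def get_topk_patterns (collected_patterns : PySem.Dict Int Int) (k : Int) : List Int :=
  let order : PySem.Dict Int Int :=
    (PySem.List.sorted collected_patterns.items (fun it => it.2) true).foldl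
      (fun d it => d.insert it.1 it.2) PySem.Dict.empty
  PySem.List.slice order.keys none (some (min k (order.size : Int)))

def build_longterm_alert_code (patterns_days : List (List Int)) (k : Int) : List Int :=
  let collected_patterns : PySem.Dict Int Int :=
    (PySem.List.pyRange 0 ((patterns_days.length : Int) - 6) 1).foldl (fun cp start =>
      let patterns_day0 := PySem.List.pyGetD patterns_days start []
      patterns_day0.foldl (fun cp pattern =>
        let appear := pvAppearLoop pattern
          (PySem.List.slice patterns_days (some start) (some (start + 6)))
        if appear = true then
          if cp.contains pattern then cp.insert pattern (cp.getD pattern 0 + 1)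
          else cp.insert pattern 1
        else cp) cp) PySem.Dict.empty
  get_topk_patterns collected_patterns k

-- ===== PORT B =====
-- B helper: the reversed-append-then-reverse loop of Source B, i.e. a right-to-left build of runs
def pvBuildRuns : List (List Int) → List (PySem.Dict Int Int)
  | [] => []
  | d :: rest =>
    let tail := pvBuildRuns rest
    let run_next := tail.headD PySem.Dict.empty
    ((PySem.Set.ofList d).foldl (fun cur p => cur.insert p (1 + run_next.getD p 0))
      PySem.Dict.empty) :: tail

def build_longterm_alert_code_alt (patterns_days : List (List Int)) (k : Int) : List Int :=
  let runs := pvBuildRuns patterns_days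
  let counts : PySem.Dict Int Int :=
    (PySem.List.pyRange 0 ((patterns_days.length : Int) - 6) 1).foldl (fun cnt start =>
      (PySem.List.pyGetD patterns_days start []).foldl (fun cnt p =>
        if (PySem.List.pyGetD runs start PySem.Dict.empty).getD p 0 ≥ 6 then
          cnt.insert p (cnt.getD p 0 + 1)
        else cnt) cnt) PySem.Dict.empty
  let ordered := (PySem.List.sorted counts.items (fun it => it.2) true).map (fun it => it.1)
  PySem.List.slice ordered none (some (min k (ordered.length : Int)))

-- ===== PRECONDITION & SPEC =====
def Spec_build_longterm_alert_code (patterns_days : List (List Int)) (k : Int) (out : List Int) : Prop := out = build_longterm_alert_code_alt patterns_days k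
instance (patterns_days : List (List Int)) (k : Int) (out : List Int) : Decidable (Spec_build_longterm_alert_code patterns_days k out) := by unfold Spec_build_longterm_alert_code; infer_instance

-- ===== CLAIM (what is proved, stated in full; the proofs are below) =====
def Claim_equal_build_longterm_alert_code : Prop := ∀ (patterns_days : List (List Int)) (k : Int), Dom_build_longterm_alert_code patterns_days k → Spec_build_longterm_alert_code patterns_days k (build_longterm_alert_code patterns_days k)

-- ===== LEMMAS AND PROOFS =====
-- run length of the maximal prefix of ds whose days all contain p
def pvPrefRun (p : Int) : List (List Int) → Int
  | [] => 0
  | d :: rest => if p ∈ d then 1 + pvPrefRun p rest else 0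

lemma pvPrefRun_nonneg (p : Int) (l : List (List Int)) : 0 ≤ pvPrefRun p l := by
  induction l with
  | nil => simp [pvPrefRun]
  | cons d rest ih =>
    by_cases h : p ∈ d
    · simp [pvPrefRun, h]; omega
    · simp [pvPrefRun, h]

lemma getD_foldl_insert_const (f : Int → Int) (l : List Int) :
    ∀ (d : PySem.Dict Int Int) (q v : Int),
      (l.foldl (fun c p => c.insert p (f p)) d).getD q v
        = if q ∈ l then f q else d.getD q v := by
  induction l with
  | nil => intro d q v; simp
  | cons p rest ih =>
    intro d q v
    simp only [List.foldl_cons, ih, List.mem_cons]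
    by_cases hq : q ∈ rest
    · simp [hq]
    · by_cases hqp : q = p
      · simp [hqp, PySem.Dict.getD_insert_self]
      · simp [hq, hqp, PySem.Dict.getD_insert]

lemma headD_pvBuildRuns_getD (ds : List (List Int)) (p : Int) :
    ((pvBuildRuns ds).headD PySem.Dict.empty).getD p 0 = pvPrefRun p ds := by
  induction ds with
  | nil => simp [pvBuildRuns, pvPrefRun, PySem.Dict.getD_empty]
  | cons d rest ih =>
    simp only [pvBuildRuns, List.headD_cons, pvPrefRun]
    rw [getD_foldl_insert_const]
    by_cases h : p ∈ d
    · simp only [PySem.Set.mem_ofList, h, if_true, List.headD_eq_head?_getD] at ih ⊢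
      rw [ih]
    · simp [PySem.Set.mem_ofList, h, PySem.Dict.getD_empty]

lemma getD_pvBuildRuns (p : Int) : ∀ (ds : List (List Int)) (i : Nat),
    ((pvBuildRuns ds).getD i PySem.Dict.empty).getD p 0 = pvPrefRun p (ds.drop i) := by
  intro ds
  induction ds with
  | nil => intro i; simp [pvBuildRuns, pvPrefRun, PySem.Dict.getD_empty]
  | cons d rest ih =>
    intro i
    cases i with
    | zero =>
      have := headD_pvBuildRuns_getD (d :: rest) p
      simpa [pvBuildRuns] using this
    | succ j => simp only [pvBuildRuns, List.getD_cons_succ, List.drop_succ_cons, ih]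

lemma appear_eq_decide (p : Int) : ∀ (n : Nat) (l : List (List Int)), n ≤ l.length →
    pvAppearLoop p (l.take n) = decide ((n : Int) ≤ pvPrefRun p l) := by
  intro n
  induction n with
  | zero => intro l _; simp [pvAppearLoop, pvPrefRun_nonneg p l]
  | succ m ih =>
    intro l hl
    cases l with
    | nil => simp at hl
    | cons d rest =>
      by_cases h : p ∈ d
      · simp only [List.take_succ_cons, pvAppearLoop, pvPrefRun, h, if_true]
        rw [ih rest (by simpa using hl)]
        simp only [decide_eq_decide]
        push_cast
        omega
      · simp only [List.take_succ_cons, pvAppearLoop, pvPrefRun, h, if_false]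
        rw [eq_comm, decide_eq_false_iff_not]
        push_cast
        omega
lemma nodup_keys_foldl_of_step {α : Type} (step : PySem.Dict Int Int → α → PySem.Dict Int Int)
    (hstep : ∀ d a, d.keys.Nodup → (step d a).keys.Nodup) :
    ∀ (l : List α) (d : PySem.Dict Int Int), d.keys.Nodup → (l.foldl step d).keys.Nodup := by
  intro l
  induction l with
  | nil => intro d hd; simpa using hd
  | cons a rest ih => intro d hd; simpa using ih (step d a) (hstep d a hd)

lemma counts_eq (pds : List (List Int)) :
    (PySem.List.pyRange 0 ((pds.length : Int) - 6) 1).foldl (fun cp start =>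
        (PySem.List.pyGetD pds start ([] : List Int)).foldl (fun cp pattern =>
          if pvAppearLoop pattern (PySem.List.slice pds (some start) (some (start + 6))) = true then
            if cp.contains pattern then cp.insert pattern (cp.getD pattern 0 + 1)
            else cp.insert pattern 1
          else cp) cp) (PySem.Dict.empty : PySem.Dict Int Int)
    = (PySem.List.pyRange 0 ((pds.length : Int) - 6) 1).foldl (fun cnt start =>
        (PySem.List.pyGetD pds start ([] : List Int)).foldl (fun cnt p =>
          if (PySem.List.pyGetD (pvBuildRuns pds) start PySem.Dict.empty).getD p 0 ≥ 6 then
            cnt.insert p (cnt.getD p 0 + 1)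
          else cnt) cnt) (PySem.Dict.empty : PySem.Dict Int Int) := by
  apply PySem.List.foldl_congr_mem
  intro acc s hs
  rw [PySem.List.mem_pyRange_one] at hs
  obtain ⟨h0, h1⟩ := hs
  apply PySem.List.foldl_congr_mem
  intro cp p _
  -- rewrite the slice and the runs lookup to the common run-length form
  have hslice : PySem.List.slice pds (some s) (some (s + 6)) = (pds.drop s.toNat).take 6 := by
    rw [PySem.List.slice_toNat pds h0 (by omega)]
    congr 1
    omega
  have hrun : (PySem.List.pyGetD (pvBuildRuns pds) s PySem.Dict.empty).getD p 0
      = pvPrefRun p (pds.drop s.toNat) := by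
    rw [← Int.toNat_of_nonneg h0, PySem.List.pyGetD_natCast, getD_pvBuildRuns, Int.toNat_natCast]
  have hlen : 6 ≤ (pds.drop s.toNat).length := by
    rw [List.length_drop]
    omega
  rw [hslice, hrun, appear_eq_decide p 6 (pds.drop s.toNat) hlen]
  by_cases hge : (6 : Int) ≤ pvPrefRun p (pds.drop s.toNat)
  · rw [if_pos (decide_eq_true (by exact_mod_cast hge)), if_pos hge]
    cases hc : cp.contains p with
    | true => rfl
    | false => rw [PySem.Dict.getD_of_not_contains cp 0 hc]; norm_num
  · rw [if_neg (by simp only [decide_eq_true_eq]; exact_mod_cast hge), if_neg hge]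
lemma topk_eq (c : PySem.Dict Int Int) (hnd : c.keys.Nodup) (k : Int) :
    get_topk_patterns c k =
      PySem.List.slice ((PySem.List.sorted c.items (fun it => it.2) true).map (fun it => it.1))
        none
        (some (min k ((((PySem.List.sorted c.items (fun it => it.2) true).map
          (fun it => it.1)).length : Nat) : Int))) := by
  unfold get_topk_patterns
  have hperm : (PySem.List.sorted c.items (fun it => it.2) true).Perm c.items :=
    PySem.List.sorted_perm c.items _ true
  have hkeys : c.items.map (fun it => it.1) = c.keys := rfl
  have hnodup : ((PySem.List.sorted c.items (fun it => it.2) true).map (fun it => it.1)).Nodup := by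
    refine ((hperm.map _).nodup_iff).mpr ?_
    rw [hkeys]; exact hnd
  have hitems := PySem.Dict.items_foldl_insert_fresh
    (PySem.List.sorted c.items (fun it => it.2) true) (fun it => it.1) (fun it => it.2)
    PySem.Dict.empty (by intro a _; simp) hnodup
  have hk : ((PySem.List.sorted c.items (fun it => it.2) true).foldl
      (fun d it => d.insert it.1 it.2) PySem.Dict.empty).keys
      = (PySem.List.sorted c.items (fun it => it.2) true).map (fun it => it.1) := by
    show (((PySem.List.sorted c.items (fun it => it.2) true).foldl
      (fun d it => d.insert it.1 it.2) PySem.Dict.empty).items).map (fun it => it.1) = _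
    rw [hitems]; simp [PySem.Dict.empty]
  have hsz : (((PySem.List.sorted c.items (fun it => it.2) true).foldl
      (fun d it => d.insert it.1 it.2) PySem.Dict.empty).size : Int)
      = (((PySem.List.sorted c.items (fun it => it.2) true).map (fun it => it.1)).length : Int) := by
    show ((((PySem.List.sorted c.items (fun it => it.2) true).foldl
      (fun d it => d.insert it.1 it.2) PySem.Dict.empty).items).length : Int) = _
    rw [hitems]; simp [PySem.Dict.empty]
  simp only [hk, hsz]

lemma counts_nodup (pds : List (List Int)) :
    ((PySem.List.pyRange 0 ((pds.length : Int) - 6) 1).foldl (fun cnt start =>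
        (PySem.List.pyGetD pds start ([] : List Int)).foldl (fun cnt p =>
          if (PySem.List.pyGetD (pvBuildRuns pds) start PySem.Dict.empty).getD p 0 ≥ 6 then
            cnt.insert p (cnt.getD p 0 + 1)
          else cnt) cnt) (PySem.Dict.empty : PySem.Dict Int Int)).keys.Nodup := by
  apply nodup_keys_foldl_of_step
  · intro d s hd
    apply nodup_keys_foldl_of_step
    · intro d' p hd'
      split
      · exact PySem.Dict.nodup_keys_insert d' p _ hd'
      · exact hd'
    · exact hd
  · exact PySem.Dict.nodup_keys_empty

-- ===== VERDICT (by name: the statement is the Claim_ definition above) =====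
theorem build_longterm_alert_code_spec : Claim_equal_build_longterm_alert_code := by
  intro patterns_days k _
  unfold Spec_build_longterm_alert_code
  unfold build_longterm_alert_code build_longterm_alert_code_alt
  dsimp only
  rw [counts_eq]
  rw [topk_eq _ (counts_nodup patterns_days) k]
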